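-- pv_equiv track=rewrite | github.com/mandeepm91/ga-crossover-comparison | src/save_results.py | get_stats_till_best_fitness
-- ===== SOURCE A (Python) =====
-- def get_stats_till_best_fitness(logbook, best_fitness):
--     gen = 0
--     nevals = 0
--     for entry in logbook:
--         gen = entry['gen']
--         nevals += entry['nevals']
--         if entry['min'] == best_fitness:
--             break
--     return gen, nevals
-- ===== SOURCE B (Python) =====
-- def get_stats_till_best_fitness(logbook, best_fitness):
--     if not logbook:
--         return 0, 0
--     cutoff = next((i for i, e in enumerate(logbook) if e['min'] == best_fitness),
--                   len(logbook) - 1)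
--     gen = logbook[cutoff]['gen']
--     nevals = sum(e['nevals'] for e in logbook[:cutoff + 1])
--     return gen, nevals
-- ===== Notes on version B (the rewrite author's own statement) =====
-- stated objective: alternative
-- what changed: Replaces the single early-breaking accumulation loop by a boundary-find (first index whose 'min' equals best_fitness, defaulting to the last index) followed by an indexed read of 'gen' and a prefix sum of 'nevals'.
import Mathlib
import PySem

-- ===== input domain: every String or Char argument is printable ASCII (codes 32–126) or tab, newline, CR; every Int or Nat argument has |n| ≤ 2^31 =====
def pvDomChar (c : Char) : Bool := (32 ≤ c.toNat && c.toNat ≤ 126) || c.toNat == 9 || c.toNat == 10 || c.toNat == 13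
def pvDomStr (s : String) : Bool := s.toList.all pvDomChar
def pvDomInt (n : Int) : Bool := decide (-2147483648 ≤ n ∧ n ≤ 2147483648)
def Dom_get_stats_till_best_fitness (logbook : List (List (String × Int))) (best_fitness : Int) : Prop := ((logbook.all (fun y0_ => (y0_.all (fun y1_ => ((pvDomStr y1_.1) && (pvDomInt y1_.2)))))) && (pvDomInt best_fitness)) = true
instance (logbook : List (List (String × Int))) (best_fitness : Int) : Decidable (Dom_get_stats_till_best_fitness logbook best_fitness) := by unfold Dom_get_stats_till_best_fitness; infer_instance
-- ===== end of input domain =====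

-- B replaces A's single early-breaking accumulation loop by a boundary-find step
-- (first index whose 'min' equals best_fitness, defaulting to the last index)
-- followed by an indexed read of 'gen' and a prefix sum of 'nevals'. Objective: alternative.

-- ===== PORT A =====
-- the for-loop with break, carrying the running (gen, nevals) state; a missing key
-- (Python KeyError) is outside Pre_, there the port reads a 0 default
def aLoop (best_fitness : Int) : List (List (String × Int)) → Int → Int → Int × Int
  | [], gen, nevals => (gen, nevals)
  | entry :: rest, _, nevals =>
      let gen' := (List.lookup "gen" entry).getD 0
      let nevals' := nevals + (List.lookup "nevals" entry).getD 0
      if List.lookup "min" entry = some best_fitness then (gen', nevals')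
      else aLoop best_fitness rest gen' nevals'

def get_stats_till_best_fitness (logbook : List (List (String × Int))) (best_fitness : Int) : Int × Int :=
  aLoop best_fitness logbook 0 0

-- ===== PORT B =====
-- cutoff index: first entry whose 'min' equals best_fitness, else the last index
def bCutoff (logbook : List (List (String × Int))) (best_fitness : Int) : Nat :=
  match logbook.findIdx? (fun e => List.lookup "min" e == some best_fitness) with
  | some i => i
  | none => logbook.length - 1

def get_stats_till_best_fitness_alt (logbook : List (List (String × Int))) (best_fitness : Int) : Int × Int :=
  match logbook with
  | [] => (0, 0)
  | _ :: _ =>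
      let cutoff := bCutoff logbook best_fitness
      let gen := ((logbook[cutoff]?).map (fun e => (List.lookup "gen" e).getD 0)).getD 0
      let nevals := ((logbook.take (cutoff + 1)).map (fun e => (List.lookup "nevals" e).getD 0)).sum
      (gen, nevals)

-- ===== PRECONDITION & SPEC =====
-- Pre_ excludes exactly the inputs on which A raises KeyError: every entry the loop
-- visits (the prefix up to and including the first entry whose 'min' equals
-- best_fitness) must carry the keys 'gen', 'nevals' and 'min'; later entries are free.
def Pre_get_stats_till_best_fitness (logbook : List (List (String × Int))) (best_fitness : Int) : Prop :=
  ∀ e ∈ logbook.take ((logbook.takeWhile (fun e => !(List.lookup "min" e == some best_fitness))).length + 1),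
    (List.lookup "gen" e).isSome ∧ (List.lookup "nevals" e).isSome ∧ (List.lookup "min" e).isSome

instance (logbook : List (List (String × Int))) (best_fitness : Int) : Decidable (Pre_get_stats_till_best_fitness logbook best_fitness) := by unfold Pre_get_stats_till_best_fitness; infer_instance

def pvWitness_get_stats_till_best_fitness : (List (List (String × Int))) × Int :=
  ([[("gen", 1), ("nevals", 3), ("min", 9)], [("gen", 2), ("nevals", 4), ("min", 5)]], 5)

def Spec_get_stats_till_best_fitness (logbook : List (List (String × Int))) (best_fitness : Int) (out : Int × Int) : Prop := out = get_stats_till_best_fitness_alt logbook best_fitness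
instance (logbook : List (List (String × Int))) (best_fitness : Int) (out : Int × Int) : Decidable (Spec_get_stats_till_best_fitness logbook best_fitness out) := by unfold Spec_get_stats_till_best_fitness; infer_instance

-- ===== CLAIM (what is proved, stated in full; the proofs are below) =====
def Claim_equal_get_stats_till_best_fitness : Prop := ∀ (logbook : List (List (String × Int))) (best_fitness : Int), Dom_get_stats_till_best_fitness logbook best_fitness → Pre_get_stats_till_best_fitness logbook best_fitness → Spec_get_stats_till_best_fitness logbook best_fitness (get_stats_till_best_fitness logbook best_fitness)

-- ===== LEMMAS AND PROOFS =====

theorem aLoop_eq_alt (best_fitness : Int) (logbook : List (List (String × Int)))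
    (hne : logbook ≠ [])
    (n : Int) (g : Int) :
    aLoop best_fitness logbook g n =
      (((logbook[bCutoff logbook best_fitness]?).map (fun e => (List.lookup "gen" e).getD 0)).getD 0,
       n + ((logbook.take (bCutoff logbook best_fitness + 1)).map (fun e => (List.lookup "nevals" e).getD 0)).sum) := by
  induction logbook generalizing n g with
  | nil => exact absurd rfl hne
  | cons e rest ih =>
    by_cases hm : List.lookup "min" e = some best_fitness
    · simp [aLoop, hm, bCutoff, List.findIdx?_cons]
    · rcases rest with _ | ⟨e2, rest2⟩
      · simp [aLoop, hm, bCutoff, List.findIdx?_cons]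
      · have hcut : bCutoff (e :: e2 :: rest2) best_fitness = bCutoff (e2 :: rest2) best_fitness + 1 := by
          unfold bCutoff
          rw [List.findIdx?_cons]
          simp only [beq_iff_eq, hm, if_false]
          cases h : List.findIdx? (fun x => List.lookup "min" x == some best_fitness) (e2 :: rest2) with
          | none => simp
          | some i => simp
        rw [aLoop]
        simp only [if_neg hm]
        rw [ih (by simp)]
        rw [hcut]
        simp [List.take_succ_cons, add_assoc]

-- ===== VERDICT (by name: the statement is the Claim_ definition above) =====
theorem get_stats_till_best_fitness_spec : Claim_equal_get_stats_till_best_fitness := by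
  intro logbook best_fitness _ _
  unfold Spec_get_stats_till_best_fitness
  cases logbook with
  | nil => rfl
  | cons e rest =>
    rw [get_stats_till_best_fitness, aLoop_eq_alt best_fitness (e :: rest) (by simp)]
    simp [get_stats_till_best_fitness_alt]
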